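-- pv_equiv track=rewrite | github.com/RobbeW/Data_Statistiek_R | Deel 3 Algoritmiek/05 Dynamisch programmeren/05 Aantal via/solution/solution.nl.py | aantal_via
-- ===== SOURCE A (Python) =====
-- def aantal_wegen(rooster):
--     nrow = len(rooster)
--     ncol = len(rooster[0])
--
--     temp = []
--     for _ in range(nrow):
--         temp.append([0]*ncol)
--
--     for r in range(nrow):
--         for c in range(ncol):
--             if rooster[r][c] == 1:
--                 el = 0
--             else:
--                 if r == 0 and c == 0:
--                     el = 1
--                 elif r == 0:
--                     el = temp[r][c-1]
--                 elif c == 0: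
--                     el = temp[r - 1][c]
--                 else:
--                     el = temp[r - 1][c] + temp[r][c - 1]
--             temp[r][c] =  el
--
--     result = temp[nrow - 1][ncol - 1]
--     return result
--
-- def aantal_via(rooster, co):
--     # opsplitsen in 2 aparte roosters en nadien vermenigvuldigen
--
--     R, C = co
--     eerste = []
--     for r in range(R + 1):
--         rij = []
--         for c in range(C + 1):
--             rij.append(rooster[r][c])
--         eerste.append(rij)
--
--     tweede = []
--     for r in range(R, len(rooster)):
--         rij = []
--         for c in range(C, len(rooster[0])):
--             rij.append(rooster[r][c])
--         tweede.append(rij)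
--
--     eerste_aantal = aantal_wegen(eerste)
--     tweede_aantal = aantal_wegen(tweede)
--
--     return eerste_aantal * tweede_aantal
-- ===== SOURCE B (Python) =====
-- def aantal_via(rooster, co):
--     # Single forward DP over the full grid with a rolling row of (total-paths, via-paths)
--     # pairs: no subgrid copies, no backward table and no final multiplication.
--     R, C = co
--     nrow = len(rooster)
--     ncol = len(rooster[0])
--     if rooster[R][C] == 1:
--         return 0  # no path passes through an obstacle
--     row = []
--     for r in range(nrow):
--         new = []
--         for c in range(ncol):
--             if rooster[r][c] == 1:
--                 f, w = 0, 0
--             else: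
--                 if r == 0 and c == 0:
--                     f, w = 1, 0
--                 else:
--                     fu, wu = row[c] if r > 0 else (0, 0)
--                     fl, wl = new[c - 1] if c > 0 else (0, 0)
--                     f, w = fu + fl, wu + wl
--                 if r == R and c == C:
--                     w = f
--             new.append((f, w))
--         row = new
--     return row[ncol - 1][1]
-- ===== Notes on version B (the rewrite author's own statement) =====
-- stated objective: alternative
-- what changed: Instead of copying two subgrids and multiplying the path counts a shared DP helper returns for each, B makes one forward pass over the full grid with a single rolling row of (total-paths, via-paths) pairs, seeding the via component at (R,C), so there is no subgrid extraction, no backward/second table and no final multiplication.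
-- outside the precondition, e.g. on aantal_via([[0, 0], [0], [0, 0]], (2, 0)): A returns 1, B raises IndexError
import Mathlib
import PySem

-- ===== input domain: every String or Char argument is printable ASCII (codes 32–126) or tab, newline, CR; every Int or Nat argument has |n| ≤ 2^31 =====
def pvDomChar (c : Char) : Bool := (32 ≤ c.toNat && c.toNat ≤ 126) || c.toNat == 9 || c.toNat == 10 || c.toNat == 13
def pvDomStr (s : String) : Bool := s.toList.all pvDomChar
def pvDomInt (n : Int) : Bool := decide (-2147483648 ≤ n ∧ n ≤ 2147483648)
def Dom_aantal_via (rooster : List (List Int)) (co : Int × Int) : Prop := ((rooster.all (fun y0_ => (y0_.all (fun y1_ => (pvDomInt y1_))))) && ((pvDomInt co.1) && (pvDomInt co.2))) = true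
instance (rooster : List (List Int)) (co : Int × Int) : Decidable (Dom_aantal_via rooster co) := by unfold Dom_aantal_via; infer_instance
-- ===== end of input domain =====

-- B replaces A's two subgrid copies + shared DP helper + multiplication by ONE forward pass over
-- the full grid with a rolling row of (total-paths, via-paths) pairs; no product is taken at the end.


-- ===== PORT A =====
-- rooster[r][c] / temp[r][c]; default only reachable outside Pre_ (Python raises there)
def pvCell (xs : List (List Int)) (r c : Int) : Int :=
  PySem.List.pyGetD (PySem.List.pyGetD xs r []) c 0

def pvAantalWegen (rooster : List (List Int)) : Int :=
  let nrow : Int := rooster.length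
  let ncol : Int := (PySem.List.pyGetD rooster 0 []).length
  let temp0 : List (List Int) := (PySem.List.pyRange 0 nrow 1).foldl
      (fun t _ => t ++ [List.replicate ncol.toNat 0]) []
  let temp := (PySem.List.pyRange 0 nrow 1).foldl (fun t r =>
      (PySem.List.pyRange 0 ncol 1).foldl (fun t c =>
        let el : Int :=
          if pvCell rooster r c = 1 then 0
          else if r = 0 ∧ c = 0 then 1
          else if r = 0 then pvCell t r (c - 1)
          else if c = 0 then pvCell t (r - 1) c
          else pvCell t (r - 1) c + pvCell t r (c - 1)
        PySem.List.pySetD t r (PySem.List.pySetD (PySem.List.pyGetD t r []) c el)) t) temp0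
  pvCell temp (nrow - 1) (ncol - 1)

def aantal_via (rooster : List (List Int)) (co : Int × Int) : Int :=
  let R := co.1
  let C := co.2
  let eerste := (PySem.List.pyRange 0 (R + 1) 1).foldl (fun acc r =>
      acc ++ [(PySem.List.pyRange 0 (C + 1) 1).foldl (fun rij c =>
        rij ++ [pvCell rooster r c]) []]) []
  let tweede := (PySem.List.pyRange R (rooster.length : Int) 1).foldl (fun acc r =>
      acc ++ [(PySem.List.pyRange C ((PySem.List.pyGetD rooster 0 []).length : Int) 1).foldl (fun rij c =>
        rij ++ [pvCell rooster r c]) []]) []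
  pvAantalWegen eerste * pvAantalWegen tweede

-- ===== PORT B =====
def aantal_via_alt (rooster : List (List Int)) (co : Int × Int) : Int :=
  let R := co.1
  let C := co.2
  let nrow : Int := rooster.length
  let ncol : Int := (PySem.List.pyGetD rooster 0 []).length
  if pvCell rooster R C = 1 then 0 else
  let row := (PySem.List.pyRange 0 nrow 1).foldl (fun row r =>
      (PySem.List.pyRange 0 ncol 1).foldl (fun new c =>
        let fw : Int × Int :=
          if pvCell rooster r c = 1 then (0, 0)
          else
            let p : Int × Int :=
              if r = 0 ∧ c = 0 then (1, 0)
              else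
                let u := if r > 0 then PySem.List.pyGetD row c ((0 : Int), (0 : Int)) else (0, 0)
                let l := if c > 0 then PySem.List.pyGetD new (c - 1) ((0 : Int), (0 : Int)) else (0, 0)
                (u.1 + l.1, u.2 + l.2)
            if r = R ∧ c = C then (p.1, p.1) else p
        new ++ [fw]) []) []
  (PySem.List.pyGetD row (ncol - 1) ((0 : Int), (0 : Int))).2

-- ===== PRECONDITION & SPEC =====
-- Pre_ excludes inputs where A raises IndexError (empty grid, via-coordinates negative or out of
-- range) and ragged grids whose first row is longer than a later row: there which cells A reads is
-- an artefact of its slicing bounds, and B reads a different set of cells and may raise where A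
-- happens to return.
def Pre_aantal_via (rooster : List (List Int)) (co : Int × Int) : Prop :=
  rooster ≠ [] ∧ 0 < (rooster.headD []).length ∧
  (∀ row ∈ rooster, (rooster.headD []).length ≤ row.length) ∧
  0 ≤ co.1 ∧ co.1 < rooster.length ∧ 0 ≤ co.2 ∧ co.2 < (rooster.headD []).length
instance (rooster : List (List Int)) (co : Int × Int) : Decidable (Pre_aantal_via rooster co) := by
  unfold Pre_aantal_via; infer_instance

def pvWitness_aantal_via : List (List Int) × (Int × Int) := ([[0, 0, 0], [0, 1, 0], [0, 0, 0]], (1, 0))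

def Spec_aantal_via (rooster : List (List Int)) (co : Int × Int) (out : Int) : Prop := out = aantal_via_alt rooster co
instance (rooster : List (List Int)) (co : Int × Int) (out : Int) : Decidable (Spec_aantal_via rooster co out) := by unfold Spec_aantal_via; infer_instance

-- ===== CLAIM (what is proved, stated in full; the proofs are below) =====
def Claim_equal_aantal_via : Prop := ∀ (rooster : List (List Int)) (co : Int × Int), Dom_aantal_via rooster co → Pre_aantal_via rooster co → Spec_aantal_via rooster co (aantal_via rooster co)

-- ===== LEMMAS AND PROOFS =====

def pvRecW (g : Nat → Nat → Int) : Nat → Nat → Int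
  | r, c =>
    if g r c = 1 then 0
    else if r = 0 ∧ c = 0 then 1
    else (match r with | 0 => 0 | r' + 1 => pvRecW g r' c)
         + (match c with | 0 => 0 | c' + 1 => pvRecW g r c')
  termination_by r c => r + c
  decreasing_by all_goals omega

def pvRecH (g : Nat → Nat → Int) (R C : Nat) : Nat → Nat → Int
  | r, c =>
    if r < R ∨ c < C ∨ g r c = 1 then 0
    else if r = R ∧ c = C then 1
    else (match r with | 0 => 0 | r' + 1 => pvRecH g R C r' c)
         + (match c with | 0 => 0 | c' + 1 => pvRecH g R C r c')
  termination_by r c => r + c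
  decreasing_by all_goals omega

-- B's via-path count: paths from (0,0) to (r,c) that pass through (R,C)
def pvRecV (g : Nat → Nat → Int) (R C : Nat) : Nat → Nat → Int
  | r, c =>
    if g r c = 1 then 0
    else if r = R ∧ c = C then pvRecW g r c
    else if r = 0 ∧ c = 0 then 0
    else (match r with | 0 => 0 | r' + 1 => pvRecV g R C r' c)
         + (match c with | 0 => 0 | c' + 1 => pvRecV g R C r c')
  termination_by r c => r + c
  decreasing_by all_goals omega

theorem pvRecW_congr (g g' : Nat → Nat → Int) :
    ∀ k r c, r + c ≤ k → (∀ i j, i ≤ r → j ≤ c → g i j = g' i j) →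
    pvRecW g r c = pvRecW g' r c := by
  intro k
  induction k with
  | zero =>
    intro r c hrc hgg
    have hr : r = 0 := by omega
    have hc : c = 0 := by omega
    subst hr; subst hc
    rw [pvRecW.eq_def, pvRecW.eq_def]; simp only []; rw [hgg 0 0 le_rfl le_rfl]
  | succ k ih =>
    intro r c hrc hgg
    rw [pvRecW.eq_def, pvRecW.eq_def]; simp only []; rw [hgg r c le_rfl le_rfl]
    by_cases h1 : g' r c = 1
    · simp [h1]
    · simp only [h1, if_false]
      by_cases h2 : r = 0 ∧ c = 0
      · simp [h2]
      · simp only [h2, if_false]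
        congr 1
        · cases r with
          | zero => rfl
          | succ r' => exact ih r' c (by omega) (fun i j hi hj => hgg i j (by omega) hj)
        · cases c with
          | zero => rfl
          | succ c' => exact ih r c' (by omega) (fun i j hi hj => hgg i j hi (by omega))

theorem pvRecH_zero_of_lt (g : Nat → Nat → Int) (R C r c : Nat) (h : r < R ∨ c < C) :
    pvRecH g R C r c = 0 := by
  rw [pvRecH.eq_def]; simp only []
  rcases h with h | h <;> simp [h]

theorem pvRecH_shift (g : Nat → Nat → Int) (R C : Nat) :
    ∀ k i j, i + j ≤ k →
    pvRecW (fun a b => g (R + a) (C + b)) i j = pvRecH g R C (R + i) (C + j) := by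
  intro k
  induction k with
  | zero =>
    intro i j hij
    have hi : i = 0 := by omega
    have hj : j = 0 := by omega
    subst hi; subst hj
    rw [pvRecW.eq_def, pvRecH.eq_def]; simp only []
    simp
  | succ k ih =>
    intro i j hij
    rw [pvRecW.eq_def, pvRecH.eq_def]; simp only []
    by_cases h1 : g (R + i) (C + j) = 1
    · rw [if_pos h1, if_pos (Or.inr (Or.inr h1))]
    · rw [if_neg h1, if_neg (show ¬(R + i < R ∨ C + j < C ∨ g (R + i) (C + j) = 1) by
        push_neg
        exact ⟨by omega, by omega, h1⟩)]
      by_cases h3 : i = 0 ∧ j = 0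
      · rw [if_pos h3, if_pos (show R + i = R ∧ C + j = C by omega)]
      · rw [if_neg h3, if_neg (show ¬(R + i = R ∧ C + j = C) from fun hh => h3 (by omega))]
        congr 1
        · cases i with
          | zero =>
            simp only [Nat.add_zero]
            cases R with
            | zero => rfl
            | succ R' => exact (pvRecH_zero_of_lt g (R' + 1) C R' (C + j) (Or.inl (by omega))).symm
          | succ i' =>
            have h5 : R + (i' + 1) = (R + i') + 1 := by omega
            rw [h5]
            exact ih i' j (by omega)
        · cases j with
          | zero =>
            simp only [Nat.add_zero]
            cases C with
            | zero => rfl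
            | succ C' => exact (pvRecH_zero_of_lt g R (C' + 1) (R + i) C' (Or.inr (by omega))).symm
          | succ j' =>
            have h5 : C + (j' + 1) = (C + j') + 1 := by omega
            rw [h5]
            exact ih i j' (by omega)

-- the key bridge: the via-path count is the product of A's two factors
theorem pvV_mul_step (g : Nat → Nat → Int) (R C r c : Nat)
    (ih : ∀ r' c', r' + c' < r + c → pvRecV g R C r' c' = pvRecW g R C * pvRecH g R C r' c') :
    pvRecV g R C r c = pvRecW g R C * pvRecH g R C r c := by
  rw [pvRecV.eq_def, pvRecH.eq_def]; simp only []
  by_cases h1 : g r c = 1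
  · rw [if_pos h1, if_pos (Or.inr (Or.inr h1))]; ring
  · rw [if_neg h1]
    by_cases h2 : r = R ∧ c = C
    · obtain ⟨rfl, rfl⟩ := h2
      rw [if_pos ⟨rfl, rfl⟩,
        if_neg (show ¬(r < r ∨ c < c ∨ g r c = 1) by push_neg; exact ⟨le_rfl, le_rfl, h1⟩),
        if_pos ⟨rfl, rfl⟩, mul_one]
    · rw [if_neg h2]
      by_cases h3 : r < R ∨ c < C
      · rw [if_pos (by omega : r < R ∨ c < C ∨ g r c = 1)]
        by_cases h4 : r = 0 ∧ c = 0
        · rw [if_pos h4]; ring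
        · rw [if_neg h4]
          have hu : (match r with | 0 => (0 : Int) | r' + 1 => pvRecV g R C r' c) = 0 := by
            cases r with
            | zero => rfl
            | succ r' =>
              show pvRecV g R C r' c = 0
              rw [ih r' c (by omega), pvRecH_zero_of_lt g R C r' c (by omega)]; ring
          have hl : (match c with | 0 => (0 : Int) | c' + 1 => pvRecV g R C r c') = 0 := by
            cases c with
            | zero => rfl
            | succ c' =>
              show pvRecV g R C r c' = 0
              rw [ih r c' (by omega), pvRecH_zero_of_lt g R C r c' (by omega)]; ring
          rw [hu, hl]; ring
      · rw [if_neg (show ¬(r < R ∨ c < C ∨ g r c = 1) by push_neg at h3 ⊢; exact ⟨h3.1, h3.2, h1⟩),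
          if_neg h2, if_neg (show ¬(r = 0 ∧ c = 0) by omega)]
        rw [mul_add]
        congr 1
        · cases r with
          | zero => show (0 : Int) = pvRecW g R C * 0; ring
          | succ r' => exact ih r' c (by omega)
        · cases c with
          | zero => show (0 : Int) = pvRecW g R C * 0; ring
          | succ c' => exact ih r c' (by omega)

theorem pvV_mul (g : Nat → Nat → Int) (R C : Nat) :
    ∀ k r c, r + c ≤ k → pvRecV g R C r c = pvRecW g R C * pvRecH g R C r c := by
  intro k
  induction k with
  | zero =>
    intro r c h
    exact pvV_mul_step g R C r c (fun r' c' h' => absurd h' (by omega))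
  | succ k ih =>
    intro r c h
    exact pvV_mul_step g R C r c (fun r' c' h' => ih r' c' (by omega))

def pvG (xs : List (List Int)) (r c : Nat) : Int := (xs.getD r []).getD c 0

def pvZRow (m : Nat) : List Int := List.replicate m 0

def pvRowOf (g : Nat → Nat → Int) (m r : Nat) : List Int := (List.range m).map (pvRecW g r)

def pvT (g : Nat → Nat → Int) (n m r : Nat) : List (List Int) :=
  (List.range n).map (fun i => if i < r then pvRowOf g m i else pvZRow m)

def pvPartial (g : Nat → Nat → Int) (m r k : Nat) : List Int :=
  (List.range k).map (pvRecW g r) ++ List.replicate (m - k) 0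

theorem pvT_length (g : Nat → Nat → Int) (n m r : Nat) : (pvT g n m r).length = n := by
  simp [pvT]

theorem pvT_getD (g : Nat → Nat → Int) (n m r i : Nat) (hi : i < n) :
    (pvT g n m r).getD i [] = if i < r then pvRowOf g m i else pvZRow m := by
  simp [pvT, List.getElem?_range hi]

theorem pvT_set_self (g : Nat → Nat → Int) (n m r : Nat) (hr : r < n) :
    (pvT g n m r).set r (pvZRow m) = pvT g n m r := by
  apply List.ext_getElem
  · simp
  · intro i h1 h2
    by_cases hir : i = r
    · subst hir
      rw [List.getElem_set_self (by simpa [pvT] using hr)]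
      simp [pvT, List.getElem_range]
    · rw [List.getElem_set_ne (by omega)]

theorem pvT_succ (g : Nat → Nat → Int) (n m r : Nat) (hr : r < n) :
    (pvT g n m r).set r (pvRowOf g m r) = pvT g n m (r + 1) := by
  apply List.ext_getElem
  · simp [pvT]
  · intro i h1 h2
    by_cases hir : i = r
    · subst hir
      rw [List.getElem_set_self (by simpa [pvT] using hr)]
      simp [pvT]
    · rw [List.getElem_set_ne (by omega)]
      simp only [pvT, List.getElem_map, List.getElem_range]
      have h3 : i < n := by simpa [pvT] using h1
      by_cases h4 : i < r
      · rw [if_pos h4, if_pos (by omega)]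
      · rw [if_neg h4, if_neg (by omega)]

theorem pvPartial_zero (g : Nat → Nat → Int) (m r : Nat) : pvPartial g m r 0 = pvZRow m := by
  simp [pvPartial, pvZRow]

theorem pvPartial_full (g : Nat → Nat → Int) (m r : Nat) : pvPartial g m r m = pvRowOf g m r := by
  simp [pvPartial, pvRowOf]

theorem pvPartial_getD (g : Nat → Nat → Int) (m r k j : Nat) (hj : j < k) :
    (pvPartial g m r k).getD j 0 = pvRecW g r j := by
  have : (pvPartial g m r k).getD j 0 = ((List.range k).map (pvRecW g r)).getD j 0 := by
    rw [pvPartial, List.getD_append]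
    simpa using hj
  rw [this, PySem.List.getD_map_range _ k j _ hj]

theorem pvPartial_set (g : Nat → Nat → Int) (m r k : Nat) (hk : k < m) :
    (pvPartial g m r k).set k (pvRecW g r k) = pvPartial g m r (k + 1) := by
  have hrep : m - k = (m - (k + 1)) + 1 := by omega
  rw [pvPartial, pvPartial, hrep, List.replicate_succ, List.set_append, List.range_succ]
  simp

theorem pvCell_natCast (xs : List (List Int)) (r c : Nat) :
    pvCell xs (r : Int) (c : Int) = pvG xs r c := by
  simp [pvCell, pvG, PySem.List.pyGetD_natCast]

theorem pvElA (xs : List (List Int)) (n m r k : Nat) (hr : r < n) (hk : k < m)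
    :
    (if pvCell xs (r : Int) (k : Int) = 1 then (0 : Int)
     else if (r : Int) = 0 ∧ (k : Int) = 0 then 1
     else if (r : Int) = 0 then pvCell ((pvT (pvG xs) n m r).set r (pvPartial (pvG xs) m r k)) (r : Int) ((k : Int) - 1)
     else if (k : Int) = 0 then pvCell ((pvT (pvG xs) n m r).set r (pvPartial (pvG xs) m r k)) ((r : Int) - 1) (k : Int)
     else pvCell ((pvT (pvG xs) n m r).set r (pvPartial (pvG xs) m r k)) ((r : Int) - 1) (k : Int) + pvCell ((pvT (pvG xs) n m r).set r (pvPartial (pvG xs) m r k)) (r : Int) ((k : Int) - 1))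
    = pvRecW (pvG xs) r k := by
  have hlenT : (pvT (pvG xs) n m r).length = n := pvT_length _ _ _ _
  have hlen : ((pvT (pvG xs) n m r).set r (pvPartial (pvG xs) m r k)).length = n := by
    simp [hlenT]
  have hrowr : ((pvT (pvG xs) n m r).set r (pvPartial (pvG xs) m r k)).getD r [] = pvPartial (pvG xs) m r k := by
    rw [List.getD_eq_getElem _ _ (by omega), List.getElem_set_self (by omega)]
  have hrowr1 : 0 < r → ((pvT (pvG xs) n m r).set r (pvPartial (pvG xs) m r k)).getD (r - 1) [] = pvRowOf (pvG xs) m (r - 1) := by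
    intro hr0
    rw [List.getD_eq_getElem _ _ (by omega), List.getElem_set_ne (by omega)]
    have := pvT_getD (pvG xs) n m r (r - 1) (by omega)
    rw [List.getD_eq_getElem _ _ (by omega)] at this
    rw [this, if_pos (by omega)]
  have hup : 0 < r → pvCell ((pvT (pvG xs) n m r).set r (pvPartial (pvG xs) m r k)) ((r : Int) - 1) (k : Int) = pvRecW (pvG xs) (r - 1) k := by
    intro hr0
    have hc : (r : Int) - 1 = ((r - 1 : Nat) : Int) := by omega
    rw [hc, pvCell_natCast, pvG, hrowr1 hr0, pvRowOf, PySem.List.getD_map_range _ m k _ hk]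
  have hleft : 0 < k → pvCell ((pvT (pvG xs) n m r).set r (pvPartial (pvG xs) m r k)) (r : Int) ((k : Int) - 1) = pvRecW (pvG xs) r (k - 1) := by
    intro hk0
    have hc : (k : Int) - 1 = ((k - 1 : Nat) : Int) := by omega
    rw [hc, pvCell_natCast, pvG, hrowr, pvPartial_getD _ _ _ _ _ (by omega)]
  rw [pvCell_natCast]
  rw [pvRecW.eq_def]; simp only []
  by_cases h1 : pvG xs r k = 1
  · rw [if_pos h1, if_pos h1]
  · rw [if_neg h1, if_neg h1]
    by_cases h2 : r = 0 ∧ k = 0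
    · rw [if_pos (by simpa using h2), if_pos h2]
    · rw [if_neg (by simpa using h2), if_neg h2]
      by_cases h3 : r = 0
      · subst h3
        have hk0 : 0 < k := by omega
        rw [if_pos (by simp)]
        cases k with
        | zero => omega
        | succ k' => simpa using hleft hk0
      · rw [if_neg (by simpa using h3)]
        by_cases h4 : k = 0
        · subst h4
          rw [if_pos (by simp)]
          cases r with
          | zero => omega
          | succ r' => simpa using hup (by omega)
        · rw [if_neg (by simpa using h4)]
          cases r with
          | zero => omega
          | succ r' =>
            cases k with
            | zero => omega
            | succ k' =>
              have e1 := hup (by omega)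
              have e2 := hleft (by omega)
              simp only [Nat.succ_sub_one] at e1 e2
              rw [e1, e2]

theorem pvInnerA (xs : List (List Int)) (n m r : Nat) (hr : r < n) :
    ∀ k, k ≤ m →
    (List.range k).foldl
      (fun t (c : Nat) =>
        PySem.List.pySetD t (r : Int)
          (PySem.List.pySetD (PySem.List.pyGetD t (r : Int) []) (c : Int)
            (if pvCell xs (r : Int) (c : Int) = 1 then 0
             else if (r : Int) = 0 ∧ (c : Int) = 0 then 1
             else if (r : Int) = 0 then pvCell t (r : Int) ((c : Int) - 1)
             else if (c : Int) = 0 then pvCell t ((r : Int) - 1) (c : Int)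
             else pvCell t ((r : Int) - 1) (c : Int) + pvCell t (r : Int) ((c : Int) - 1))))
      (pvT (pvG xs) n m r)
    = (pvT (pvG xs) n m r).set r (pvPartial (pvG xs) m r k) := by
  intro k
  induction k with
  | zero =>
    intro _
    simp [pvPartial_zero, pvT_set_self _ _ _ _ hr]
  | succ k ih =>
    intro hk
    rw [List.range_succ, List.foldl_append, ih (by omega)]
    simp only [List.foldl_cons, List.foldl_nil]
    rw [pvElA xs n m r k hr (by omega)]
    have hlen : ((pvT (pvG xs) n m r).set r (pvPartial (pvG xs) m r k)).length = n := by
      simp [pvT_length]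
    have hrowr : ((pvT (pvG xs) n m r).set r (pvPartial (pvG xs) m r k)).getD r [] = pvPartial (pvG xs) m r k := by
      rw [List.getD_eq_getElem _ _ (by omega), List.getElem_set_self (by omega)]
    rw [PySem.List.pyGetD_natCast, hrowr, PySem.List.pySetD_natCast, PySem.List.pySetD_natCast,
      List.set_set, pvPartial_set _ _ _ _ (by omega)]

theorem pvWegen_eq (xs : List (List Int)) (n m : Nat)
    (hn : xs.length = n) (hm : ∀ row ∈ xs, row.length = m) (hn0 : 0 < n) (hm0 : 0 < m) :
    pvAantalWegen xs = pvRecW (pvG xs) (n - 1) (m - 1) := by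
  have hxs0 : PySem.List.pyGetD xs 0 [] = xs.getD 0 [] := PySem.List.pyGetD_zero xs []
  have hm' : (PySem.List.pyGetD xs 0 []).length = m := by
    rw [hxs0]
    cases xs with
    | nil => simp at hn; omega
    | cons a t => exact hm a (by simp)
  simp only [pvAantalWegen, hn, hm']
  rw [PySem.List.pyRange_zero_nat n, PySem.List.pyRange_zero_nat m]
  simp only [List.foldl_map]
  have htemp0 : (List.range n).foldl (fun t (_ : Nat) => t ++ [List.replicate ((m : Int)).toNat 0]) []
      = pvT (pvG xs) n m 0 := by
    rw [PySem.List.foldl_append_singleton_eq_map]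
    simp [pvT, pvZRow]
  rw [htemp0]
  have main : ∀ r, r ≤ n →
      (List.range r).foldl (fun t (r : Nat) =>
        List.foldl (fun t (c : Nat) =>
          PySem.List.pySetD t (r : Int)
            (PySem.List.pySetD (PySem.List.pyGetD t (r : Int) []) (c : Int)
              (if pvCell xs (r : Int) (c : Int) = 1 then 0
               else if (r : Int) = 0 ∧ (c : Int) = 0 then 1
               else if (r : Int) = 0 then pvCell t (r : Int) ((c : Int) - 1)
               else if (c : Int) = 0 then pvCell t ((r : Int) - 1) (c : Int)
               else pvCell t ((r : Int) - 1) (c : Int) + pvCell t (r : Int) ((c : Int) - 1))))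
          t (List.range m)) (pvT (pvG xs) n m 0)
      = pvT (pvG xs) n m r := by
    intro r
    induction r with
    | zero => intro _; rfl
    | succ r ih =>
      intro hr
      rw [List.range_succ, List.foldl_append, ih (by omega)]
      simp only [List.foldl_cons, List.foldl_nil]
      rw [pvInnerA xs n m r (by omega) m (le_refl m), pvPartial_full, pvT_succ _ _ _ _ (by omega)]
  rw [main n (le_refl n)]
  have hc1 : ((n : Int)) - 1 = ((n - 1 : Nat) : Int) := by omega
  have hc2 : ((m : Int)) - 1 = ((m - 1 : Nat) : Int) := by omega
  rw [hc1, hc2, pvCell_natCast, pvG]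
  have h1 : (pvT (pvG xs) n m n).getD (n - 1) [] = pvRowOf (pvG xs) m (n - 1) := by
    rw [pvT_getD _ _ _ _ _ (by omega), if_pos (by omega)]
  rw [h1, pvRowOf, PySem.List.getD_map_range _ m (m - 1) _ (by omega)]

-- ===== B-side machinery: one pass over pairs =====

def pvPair (g : Nat → Nat → Int) (R C r c : Nat) : Int × Int :=
  (pvRecW g r c, pvRecV g R C r c)

theorem pvRecW_sum (g : Nat → Nat → Int) (r c : Nat) (h1 : ¬ g r c = 1) (h2 : ¬(r = 0 ∧ c = 0)) :
    pvRecW g r c = (if 0 < r then pvRecW g (r - 1) c else 0) + (if 0 < c then pvRecW g r (c - 1) else 0) := by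
  rw [pvRecW.eq_def]
  simp only []
  rw [if_neg h1, if_neg h2]
  congr 1
  · cases r with
    | zero => simp
    | succ r' => simp
  · cases c with
    | zero => simp
    | succ c' => simp

theorem pvRecV_sum (g : Nat → Nat → Int) (R C r c : Nat) (h1 : ¬ g r c = 1)
    (h3 : ¬(r = R ∧ c = C)) (h2 : ¬(r = 0 ∧ c = 0)) :
    pvRecV g R C r c = (if 0 < r then pvRecV g R C (r - 1) c else 0) + (if 0 < c then pvRecV g R C r (c - 1) else 0) := by
  rw [pvRecV.eq_def]
  simp only []
  rw [if_neg h1, if_neg h3, if_neg h2]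
  congr 1
  · cases r with
    | zero => simp
    | succ r' => simp
  · cases c with
    | zero => simp
    | succ c' => simp

theorem pvFoldRowP {α : Type} (F : Int → α → α) (rec : Nat → α) (d : α) (m : Nat)
    (h : ∀ k < m, rec k = F (k : Int) (if 0 < k then rec (k - 1) else d)) :
    (List.range m).foldl
      (fun rij (c : Nat) => rij ++ [F (c : Int) (if (c : Int) > 0 then PySem.List.pyGetD rij ((c : Int) - 1) d else d)]) []
      = (List.range m).map rec := by
  induction m with
  | zero => rfl
  | succ m ih =>
    have ih' := ih (fun k hk => h k (by omega))
    rw [List.range_succ, List.foldl_append, List.map_append, ih']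
    simp only [List.foldl_cons, List.foldl_nil, List.map_cons, List.map_nil]
    congr 1
    cases m with
    | zero =>
      simp [h 0 (by omega)]
    | succ k =>
      have hc : ((k + 1 : Nat) : Int) - 1 = ((k : Nat) : Int) := by push_cast; ring
      rw [if_pos (by positivity), hc, PySem.List.pyGetD_natCast,
        PySem.List.getD_map_range rec (k + 1) k d (by omega)]
      have := h (k + 1) (by omega)
      simp only [Nat.succ_sub_one, if_pos (Nat.succ_pos k)] at this
      rw [← this]

theorem pvFoldOuter {β : Type} (step : β → Nat → β) (S : Nat → β) (n : Nat)
    (h : ∀ r < n, step (S r) r = S (r + 1)) :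
    (List.range n).foldl step (S 0) = S n := by
  induction n with
  | zero => rfl
  | succ n ih =>
    rw [List.range_succ, List.foldl_append, ih (fun r hr => h r (by omega))]
    simp only [List.foldl_cons, List.foldl_nil]
    exact h n (by omega)

-- the pair recurrence of B's inner loop, for a fixed row r with the previous row available
theorem pvPairRec (rooster : List (List Int)) (m Rn Cn r : Nat) (row : List (Int × Int))
    (hrow : ∀ j, j < m → 0 < r → PySem.List.pyGetD row ((j : Nat) : Int) ((0 : Int), (0 : Int)) = pvPair (pvG rooster) Rn Cn (r - 1) j) :
    ∀ k, k < m →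
    pvPair (pvG rooster) Rn Cn r k =
      (if pvCell rooster (r : Int) (k : Int) = 1 then ((0 : Int), (0 : Int))
       else
         let p : Int × Int :=
           if (r : Int) = 0 ∧ (k : Int) = 0 then (1, 0)
           else
             let u := if (r : Int) > 0 then PySem.List.pyGetD row (k : Int) ((0 : Int), (0 : Int)) else (0, 0)
             let l := if 0 < k then pvPair (pvG rooster) Rn Cn r (k - 1) else ((0 : Int), (0 : Int))
             (u.1 + l.1, u.2 + l.2)
         if (r : Int) = (Rn : Int) ∧ (k : Int) = (Cn : Int) then (p.1, p.1) else p) := by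
  intro k hk
  have hvia : ((r : Int) = (Rn : Int) ∧ (k : Int) = (Cn : Int)) ↔ (r = Rn ∧ k = Cn) := by
    constructor <;> (intro h; exact ⟨by exact_mod_cast h.1, by exact_mod_cast h.2⟩)
  have hc0 : ((r : Int) = 0 ∧ (k : Int) = 0) ↔ (r = 0 ∧ k = 0) := by omega
  rw [pvCell_natCast]
  by_cases h1 : pvG rooster r k = 1
  · rw [if_pos h1]
    refine Prod.ext ?_ ?_
    · show pvRecW (pvG rooster) r k = 0
      rw [pvRecW.eq_def]; simp [h1]
    · show pvRecV (pvG rooster) Rn Cn r k = 0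
      rw [pvRecV.eq_def]; simp [h1]
  · rw [if_neg h1]
    have hu : (if (r : Int) > 0 then PySem.List.pyGetD row (k : Int) ((0 : Int), (0 : Int)) else (0, 0))
        = ((if 0 < r then pvRecW (pvG rooster) (r - 1) k else 0),
           (if 0 < r then pvRecV (pvG rooster) Rn Cn (r - 1) k else 0)) := by
      cases r with
      | zero => simp
      | succ r' =>
        rw [if_pos (by positivity), hrow k hk (Nat.succ_pos r')]
        simp [pvPair]
    have hl : (if 0 < k then pvPair (pvG rooster) Rn Cn r (k - 1) else ((0 : Int), (0 : Int)))
        = ((if 0 < k then pvRecW (pvG rooster) r (k - 1) else 0),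
           (if 0 < k then pvRecV (pvG rooster) Rn Cn r (k - 1) else 0)) := by
      by_cases hk0 : 0 < k
      · rw [if_pos hk0, if_pos hk0, if_pos hk0]; rfl
      · rw [if_neg hk0, if_neg hk0, if_neg hk0]
    simp only [hu, hl, hc0, hvia]
    by_cases h2 : r = 0 ∧ k = 0
    · obtain ⟨rfl, rfl⟩ := h2
      by_cases h3 : (0 : Nat) = Rn ∧ (0 : Nat) = Cn
      · simp only [if_pos h3]
        refine Prod.ext ?_ ?_
        · show pvRecW (pvG rooster) 0 0 = 1
          rw [pvRecW.eq_def]; simp [h1]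
        · show pvRecV (pvG rooster) Rn Cn 0 0 = 1
          rw [pvRecV.eq_def]
          simp only []
          rw [if_neg h1, if_pos h3]
          rw [pvRecW.eq_def]; simp [h1]
      · simp only [if_neg h3]
        refine Prod.ext ?_ ?_
        · show pvRecW (pvG rooster) 0 0 = 1
          rw [pvRecW.eq_def]; simp [h1]
        · show pvRecV (pvG rooster) Rn Cn 0 0 = 0
          rw [pvRecV.eq_def]
          simp only []
          rw [if_neg h1, if_neg h3]
          simp
    · simp only [if_neg h2]
      by_cases h3 : r = Rn ∧ k = Cn
      · simp only [if_pos h3]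
        refine Prod.ext ?_ ?_
        · exact pvRecW_sum (pvG rooster) r k h1 h2
        · show pvRecV (pvG rooster) Rn Cn r k = _
          rw [pvRecV.eq_def]
          simp only []
          rw [if_neg h1, if_pos h3]
          exact pvRecW_sum (pvG rooster) r k h1 h2
      · simp only [if_neg h3]
        refine Prod.ext ?_ ?_
        · exact pvRecW_sum (pvG rooster) r k h1 h2
        · exact pvRecV_sum (pvG rooster) Rn Cn r k h1 h3 h2

theorem pvInnerB (rooster : List (List Int)) (m Rn Cn r : Nat) (row : List (Int × Int))
    (hrow : ∀ j, j < m → 0 < r → PySem.List.pyGetD row ((j : Nat) : Int) ((0 : Int), (0 : Int)) = pvPair (pvG rooster) Rn Cn (r - 1) j) :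
    (List.range m).foldl (fun new (c : Nat) =>
      new ++ [if pvCell rooster (r : Int) (c : Int) = 1 then ((0 : Int), (0 : Int))
              else
                let p : Int × Int :=
                  if (r : Int) = 0 ∧ (c : Int) = 0 then (1, 0)
                  else
                    let u := if (r : Int) > 0 then PySem.List.pyGetD row (c : Int) ((0 : Int), (0 : Int)) else (0, 0)
                    let l := if (c : Int) > 0 then PySem.List.pyGetD new ((c : Int) - 1) ((0 : Int), (0 : Int)) else (0, 0)
                    (u.1 + l.1, u.2 + l.2)
                if (r : Int) = (Rn : Int) ∧ (c : Int) = (Cn : Int) then (p.1, p.1) else p]) []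
    = (List.range m).map (fun c => pvPair (pvG rooster) Rn Cn r c) := by
  have h := pvFoldRowP (fun ci prev =>
      if pvCell rooster (r : Int) ci = 1 then ((0 : Int), (0 : Int))
      else
        let p : Int × Int :=
          if (r : Int) = 0 ∧ ci = 0 then (1, 0)
          else
            let u := if (r : Int) > 0 then PySem.List.pyGetD row ci ((0 : Int), (0 : Int)) else (0, 0)
            (u.1 + prev.1, u.2 + prev.2)
        if (r : Int) = (Rn : Int) ∧ ci = (Cn : Int) then (p.1, p.1) else p)
    (fun c => pvPair (pvG rooster) Rn Cn r c) ((0 : Int), (0 : Int)) m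
    (fun k hk => pvPairRec rooster m Rn Cn r row hrow k hk)
  simpa using h

def pvS (g : Nat → Nat → Int) (R C m : Nat) : Nat → List (Int × Int)
  | 0 => []
  | r + 1 => (List.range m).map (fun c => pvPair g R C r c)

theorem pvAltEq (rooster : List (List Int)) (co : Int × Int) (n m Rn Cn : Nat)
    (hn : rooster.length = n) (hm' : (PySem.List.pyGetD rooster 0 []).length = m)
    (h1 : co.1 = (Rn : Int)) (h2 : co.2 = (Cn : Int))
    (hn0 : 0 < n) (hm0 : 0 < m) (hobs : ¬ pvG rooster Rn Cn = 1) :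
    aantal_via_alt rooster co = pvRecV (pvG rooster) Rn Cn (n - 1) (m - 1) := by
  obtain ⟨n', rfl⟩ : ∃ n', n = n' + 1 := ⟨n - 1, by omega⟩
  simp only [aantal_via_alt, hn, hm', h1, h2]
  rw [pvCell_natCast, if_neg hobs]
  rw [PySem.List.pyRange_zero_nat (n' + 1)]
  simp only [PySem.List.pyRange_zero_nat m, List.foldl_map]
  have houter :
      (List.range (n' + 1)).foldl (fun row (r : Nat) =>
        (List.range m).foldl (fun new (c : Nat) =>
          new ++ [if pvCell rooster (r : Int) (c : Int) = 1 then ((0 : Int), (0 : Int))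
                  else
                    let p : Int × Int :=
                      if (r : Int) = 0 ∧ (c : Int) = 0 then (1, 0)
                      else
                        let u := if (r : Int) > 0 then PySem.List.pyGetD row (c : Int) ((0 : Int), (0 : Int)) else (0, 0)
                        let l := if (c : Int) > 0 then PySem.List.pyGetD new ((c : Int) - 1) ((0 : Int), (0 : Int)) else (0, 0)
                        (u.1 + l.1, u.2 + l.2)
                    if (r : Int) = (Rn : Int) ∧ (c : Int) = (Cn : Int) then (p.1, p.1) else p]) []) []
      = pvS (pvG rooster) Rn Cn m (n' + 1) := by
    refine pvFoldOuter _ (pvS (pvG rooster) Rn Cn m) (n' + 1) ?_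
    intro r hr
    cases r with
    | zero => exact pvInnerB rooster m Rn Cn 0 [] (fun j hj h0 => absurd h0 (by omega))
    | succ r' =>
      refine pvInnerB rooster m Rn Cn (r' + 1) _ ?_
      intro j hj _
      show PySem.List.pyGetD ((List.range m).map (fun c => pvPair (pvG rooster) Rn Cn r' c)) ((j : Nat) : Int) ((0 : Int), (0 : Int)) = _
      rw [PySem.List.pyGetD_natCast, PySem.List.getD_map_range _ m j _ hj]
      simp
  rw [houter]
  show (PySem.List.pyGetD ((List.range m).map (fun c => pvPair (pvG rooster) Rn Cn n' c)) (((m : Nat) : Int) - 1) ((0 : Int), (0 : Int))).2 = _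
  rw [show ((m : Nat) : Int) - 1 = ((m - 1 : Nat) : Int) by omega, PySem.List.pyGetD_natCast,
    PySem.List.getD_map_range _ m (m - 1) _ (by omega)]
  simp [pvPair]

theorem pvAEq (rooster : List (List Int)) (co : Int × Int) (n m Rn Cn : Nat)
    (hn : rooster.length = n) (hm' : (PySem.List.pyGetD rooster 0 []).length = m)
    (h1 : co.1 = (Rn : Int)) (h2 : co.2 = (Cn : Int))
    (hRn : Rn < n) (hCn : Cn < m) (hn0 : 0 < n) (hm0 : 0 < m) :
    aantal_via rooster co
      = pvRecW (pvG rooster) Rn Cn * pvRecH (pvG rooster) Rn Cn (n - 1) (m - 1) := by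
  simp only [aantal_via, hn, hm', h1, h2]
  simp only [PySem.List.foldl_append_singleton_eq_map, List.nil_append]
  have hcR : ((Rn : Int)) + 1 = ((Rn + 1 : Nat) : Int) := by push_cast; ring
  have hcC : ((Cn : Int)) + 1 = ((Cn + 1 : Nat) : Int) := by push_cast; ring
  rw [hcR, hcC, PySem.List.pyRange_zero_nat (Rn + 1), PySem.List.pyRange_zero_nat (Cn + 1),
    PySem.List.pyRange_one (Rn : Int) (n : Int), PySem.List.pyRange_one (Cn : Int) (m : Int)]
  have htn : (((n : Int)) - ((Rn : Int))).toNat = n - Rn := by omega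
  have htm : (((m : Int)) - ((Cn : Int))).toNat = m - Cn := by omega
  rw [htn, htm]
  simp only [List.map_map, Function.comp_def]
  have hE := pvWegen_eq ((List.range (Rn + 1)).map (fun (r : Nat) => (List.range (Cn + 1)).map (fun (c : Nat) => pvCell rooster (r : Int) (c : Int))))
    (Rn + 1) (Cn + 1) (by simp) (by intro row hrow; simp at hrow; obtain ⟨r, _, rfl⟩ := hrow; simp) (by omega) (by omega)
  have hGE : ∀ i j, i ≤ Rn → j ≤ Cn →
      pvG ((List.range (Rn + 1)).map (fun (r : Nat) => (List.range (Cn + 1)).map (fun (c : Nat) => pvCell rooster (r : Int) (c : Int)))) i j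
        = pvG rooster i j := by
    intro i j hi hj
    rw [pvG, PySem.List.getD_map_range _ (Rn + 1) i _ (by omega),
      PySem.List.getD_map_range _ (Cn + 1) j _ (by omega), pvCell_natCast]
  have hT := pvWegen_eq ((List.range (n - Rn)).map (fun (i : Nat) => (List.range (m - Cn)).map (fun (j : Nat) => pvCell rooster ((Rn : Int) + (i : Int)) ((Cn : Int) + (j : Int)))))
    (n - Rn) (m - Cn) (by simp) (by intro row hrow; simp at hrow; obtain ⟨r, _, rfl⟩ := hrow; simp) (by omega) (by omega)
  have hGT : ∀ i j, i ≤ n - Rn - 1 → j ≤ m - Cn - 1 →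
      pvG ((List.range (n - Rn)).map (fun (i : Nat) => (List.range (m - Cn)).map (fun (j : Nat) => pvCell rooster ((Rn : Int) + (i : Int)) ((Cn : Int) + (j : Int))))) i j
        = pvG rooster (Rn + i) (Cn + j) := by
    intro i j hi hj
    rw [pvG, PySem.List.getD_map_range _ (n - Rn) i _ (by omega),
      PySem.List.getD_map_range _ (m - Cn) j _ (by omega)]
    rw [show ((Rn : Int) + (i : Int)) = ((Rn + i : Nat) : Int) by push_cast; ring,
      show ((Cn : Int) + (j : Int)) = ((Cn + j : Nat) : Int) by push_cast; ring,
      pvCell_natCast]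
  rw [hE, hT]
  have e1 := pvRecW_congr _ _ (Rn + Cn) Rn Cn (le_refl _) hGE
  have e2 := pvRecW_congr _ (fun a b => pvG rooster (Rn + a) (Cn + b))
    ((n - Rn - 1) + (m - Cn - 1)) (n - Rn - 1) (m - Cn - 1) (le_refl _) hGT
  have e3 := pvRecH_shift (pvG rooster) Rn Cn ((n - Rn - 1) + (m - Cn - 1)) (n - Rn - 1) (m - Cn - 1) (le_refl _)
  simp only [Nat.add_sub_cancel]
  rw [e1, e2, e3,
    show Rn + (n - Rn - 1) = n - 1 by omega,
    show Cn + (m - Cn - 1) = m - 1 by omega]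

theorem pvFinal (rooster : List (List Int)) (co : Int × Int) (hpre : Pre_aantal_via rooster co) :
    aantal_via rooster co = aantal_via_alt rooster co := by
  obtain ⟨hne, hm0, hrect, hc1, hc2, hc3, hc4⟩ := hpre
  have hx : PySem.List.pyGetD rooster 0 [] = rooster.headD [] := by
    rw [PySem.List.pyGetD_zero]
    cases rooster with
    | nil => simp at hne
    | cons a t => rfl
  have hm' : (PySem.List.pyGetD rooster 0 []).length = (rooster.headD []).length := by rw [hx]
  have hn0 : 0 < rooster.length := List.length_pos_iff.mpr hne
  have e1 : co.1 = ((co.1.toNat : Nat) : Int) := by omega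
  have e2 : co.2 = ((co.2.toNat : Nat) : Int) := by omega
  have hRn : co.1.toNat < rooster.length := by omega
  have hCn : co.2.toNat < (rooster.headD []).length := by omega
  by_cases hobs : pvG rooster co.1.toNat co.2.toNat = 1
  · have hA : aantal_via rooster co = 0 := by
      rw [pvAEq rooster co rooster.length (rooster.headD []).length co.1.toNat co.2.toNat rfl hm'
        e1 e2 hRn hCn hn0 hm0, pvRecW.eq_def]
      simp [hobs]
    have hcell : pvCell rooster co.1 co.2 = 1 := by
      rw [e1, e2, pvCell_natCast]; exact hobs
    have hB : aantal_via_alt rooster co = 0 := by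
      simp only [aantal_via_alt]
      rw [if_pos hcell]
    rw [hA, hB]
  · rw [pvAEq rooster co rooster.length (rooster.headD []).length co.1.toNat co.2.toNat rfl hm'
      e1 e2 hRn hCn hn0 hm0,
    pvAltEq rooster co rooster.length (rooster.headD []).length co.1.toNat co.2.toNat rfl hm'
      e1 e2 hn0 hm0 hobs,
    ← pvV_mul (pvG rooster) co.1.toNat co.2.toNat
      ((rooster.length - 1) + ((rooster.headD []).length - 1)) _ _ (le_refl _)]

-- ===== VERDICT (by name: the statement is the Claim_ definition above) =====
theorem aantal_via_spec : Claim_equal_aantal_via := by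
  intro rooster co _ hpre
  unfold Spec_aantal_via
  exact pvFinal rooster co hpre
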